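-- pv_equiv track=rewrite | github.com/Jonathanseng/Logic-for-coding | 2.  Syntactic properties of propositional formulas.py | is_formula
-- ===== SOURCE A (Python) =====
-- def is_atomic(formula):
--   """Returns True if formula is an atomic formula, False otherwise."""
--   if not isinstance(formula, str):
--     return False
--   return formula in ["True", "False"]
--
-- def is_connective(formula):
--   """Returns True if formula is a connective, False otherwise."""
--   if not isinstance(formula, str):
--     return False
--   return formula in ["and", "or", "not"]
--
-- def is_formula(formula):
--   """Returns True if formula is a propositional logic formula, False otherwise."""
--   if is_atomic(formula):
--     return True
--   elif is_connective(formula):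
--     if len(formula) == 1:
--       return False
--     elif is_formula(formula[0]) and is_formula(formula[1]):
--       return True
--     else:
--       return False
--   else:
--     return False
-- ===== SOURCE B (Python) =====
-- def is_formula(formula):
--   """Returns True if formula is a propositional logic formula, False otherwise.
--
--   The recursive connective branch of the original can never succeed (it recurses
--   on single characters, which are neither atomic nor connective), so the result
--   is a direct membership test."""
--   return isinstance(formula, str) and formula in ("True", "False")
-- ===== Notes on version B (the rewrite author's own statement) =====
-- stated objective: simpler
-- what changed: Replaced the recursive descent (atomic / connective with recursion on the first two characters) by a single closed-form membership test, since the connective branch always yields False.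
import Mathlib
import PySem

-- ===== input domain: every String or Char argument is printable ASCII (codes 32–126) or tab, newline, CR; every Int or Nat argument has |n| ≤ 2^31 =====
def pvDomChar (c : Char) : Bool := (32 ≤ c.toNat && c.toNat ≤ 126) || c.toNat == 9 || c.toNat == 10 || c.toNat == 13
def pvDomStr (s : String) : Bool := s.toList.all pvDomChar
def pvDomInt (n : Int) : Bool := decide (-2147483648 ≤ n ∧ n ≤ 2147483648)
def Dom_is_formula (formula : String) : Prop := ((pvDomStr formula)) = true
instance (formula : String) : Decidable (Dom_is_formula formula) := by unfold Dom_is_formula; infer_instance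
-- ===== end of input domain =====

-- B replaces A's recursive descent by a single membership test ("True"/"False"); objective: simpler.


-- ===== PORT A =====
-- isinstance(formula, str) is always true under the type convention (formula : String).
def is_atomic (formula : String) : Bool :=
  formula == "True" || formula == "False"

def is_connective (formula : String) : Bool :=
  formula == "and" || formula == "or" || formula == "not"

-- formula[0] / formula[1] via PySem.Str.pyGet?; the none (IndexError) arms are
-- unreachable because the connective branch implies length ≥ 2.
def is_formula (formula : String) : Bool :=
  if is_atomic formula then true
  else if h : is_connective formula then
    if PySem.Str.len formula == 1 then false
    else
      match h0 : PySem.Str.pyGet? formula 0, h1 : PySem.Str.pyGet? formula 1 with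
      | some c0, some c1 =>
          if is_formula (String.ofList [c0]) && is_formula (String.ofList [c1]) then true
          else false
      | _, _ => false
  else false
termination_by formula.length
decreasing_by
  all_goals
    simp only [is_connective, Bool.or_eq_true, beq_iff_eq] at h
    rw [← String.length_toList, String.toList_ofList]
    rcases h with (h | h) | h <;> subst h <;> (norm_num; decide)

-- ===== PORT B =====
def is_formula_alt (formula : String) : Bool :=
  formula == "True" || formula == "False"

-- ===== PRECONDITION & SPEC =====
def Spec_is_formula (formula : String) (out : Bool) : Prop := out = is_formula_alt formula
instance (formula : String) (out : Bool) : Decidable (Spec_is_formula formula out) := by unfold Spec_is_formula; infer_instance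

-- ===== CLAIM (what is proved, stated in full; the proofs are below) =====
def Claim_equal_is_formula : Prop := ∀ (formula : String), Dom_is_formula formula → Spec_is_formula formula (is_formula formula)

-- ===== LEMMAS AND PROOFS =====
theorem is_formula_single (c : Char) (hc : c = 'a' ∨ c = 'n' ∨ c = 'o') :
    is_formula (String.ofList [c]) = false := by
  rcases hc with h | h | h <;> subst h <;> (rw [is_formula]; rfl)

theorem is_formula_and : is_formula "and" = false := by
  rw [is_formula]
  show (if is_formula (String.ofList ['a']) && is_formula (String.ofList ['n']) then true
        else false) = false
  rw [is_formula_single 'a' (by tauto)]; rfl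

theorem is_formula_or : is_formula "or" = false := by
  rw [is_formula]
  show (if is_formula (String.ofList ['o']) && is_formula (String.ofList ['r']) then true
        else false) = false
  rw [is_formula_single 'o' (by tauto)]; rfl

theorem is_formula_not : is_formula "not" = false := by
  rw [is_formula]
  show (if is_formula (String.ofList ['n']) && is_formula (String.ofList ['o']) then true
        else false) = false
  rw [is_formula_single 'n' (by tauto)]; rfl

theorem is_formula_eq (formula : String) : is_formula formula = is_formula_alt formula := by
  by_cases ha : is_atomic formula = true
  · rw [is_formula]
    simp only [ha, if_true]
    simp only [is_atomic, Bool.or_eq_true, beq_iff_eq] at ha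
    rcases ha with h | h <;> subst h <;> decide
  · by_cases hc : is_connective formula = true
    · have h3 : formula = "and" ∨ formula = "or" ∨ formula = "not" := by
        have := hc; simp only [is_connective, Bool.or_eq_true, beq_iff_eq] at this; tauto
      rcases h3 with h | h | h <;> subst h <;>
        simp [is_formula_and, is_formula_or, is_formula_not, is_formula_alt]
    · rw [is_formula]
      simp only [ha, Bool.false_eq, dif_neg hc]
      simp only [is_atomic, Bool.or_eq_true, beq_iff_eq, not_or] at ha
      simp [is_formula_alt, ha.1, ha.2]

-- ===== VERDICT (by name: the statement is the Claim_ definition above) =====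
theorem is_formula_spec : Claim_equal_is_formula := by
  intro formula _
  exact is_formula_eq formula
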